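-- pv_equiv track=rewrite | github.com/Parastoo-S/Python | Simple Functions 2.py | crypto
-- ===== SOURCE A (Python) =====
-- def crypto(s):
--     '''(string)->string
--     Function crypto takes as an input a string s and retruns encrypted string.
--     The encryption proceeds as follow:last, first, second_to_last, second,
--     third_from_the_back, third... .'''
--     x=1
--     y=' '
--     for i in range(len(s)):
--         if x==1:
--             y=y+s[-1]
--             s= s[0:-1]
--             x=x*-1
--
--         else:
--             y=y+s[0]
--             s=s[1:]
--             x=x*-1
--
--     return y
-- ===== SOURCE B (Python) =====
-- def crypto(s):
--     rev = s[::-1]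
--     out = []
--     for a, b in zip(rev, s):
--         out.append(a)
--         out.append(b)
--     return ' ' + ''.join(out[:len(s)])
-- ===== Notes on version B (the rewrite author's own statement) =====
-- stated objective: faster
-- what changed: A's stateful loop that toggles a sign flag and repeatedly re-slices the shrinking string is replaced by precomputing the reversed string once, interleaving it with the forward string via zip into a flat list, and truncating to len(s) before prepending the leading space.
import Mathlib
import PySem

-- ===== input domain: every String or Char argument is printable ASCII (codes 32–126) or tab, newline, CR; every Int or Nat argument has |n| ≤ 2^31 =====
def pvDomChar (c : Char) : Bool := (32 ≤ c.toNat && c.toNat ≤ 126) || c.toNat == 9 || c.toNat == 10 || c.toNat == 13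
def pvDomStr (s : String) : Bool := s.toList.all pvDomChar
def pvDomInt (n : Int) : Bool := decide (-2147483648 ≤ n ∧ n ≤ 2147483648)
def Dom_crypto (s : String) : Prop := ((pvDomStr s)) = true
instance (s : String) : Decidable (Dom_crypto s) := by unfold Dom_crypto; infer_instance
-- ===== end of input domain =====

-- B replaces A's stateful pointer-toggling loop (which repeatedly slices the shrinking string)
-- by a single interleaving of the precomputed reversed string with the forward string, truncated
-- to len(s); objective: faster (O(n) vs A's repeated string slicing), same output incl. the ' ' prefix.

-- ===== PORT A =====
-- A's loop: fuel = len(s) iterations; x toggles between 1 and -1; on x=1 append s[-1] and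
-- drop it (s[0:-1]); else append s[0] and drop it (s[1:]). s[-1] is ported as
-- `t.drop (t.length - 1)` (the one-char suffix) — exact, since within the loop t is never
-- empty when accessed (the loop runs exactly length-many iterations, removing one char each).
def cryptoLoop : Nat → Int → List Char → List Char → List Char
  | 0, _, _, y => y
  | n + 1, x, t, y =>
    if x = 1 then
      cryptoLoop n (x * -1) t.dropLast (y ++ t.drop (t.length - 1))
    else
      cryptoLoop n (x * -1) (t.drop 1) (y ++ t.take 1)

def crypto (s : String) : String :=
  String.ofList (cryptoLoop s.toList.length 1 s.toList [' '])

-- ===== PORT B =====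
def crypto_alt (s : String) : String :=
  String.ofList (' ' ::
    (((s.toList.reverse).zip s.toList).flatMap (fun p => [p.1, p.2])).take s.toList.length)

-- ===== PRECONDITION & SPEC =====
def Spec_crypto (s : String) (out : String) : Prop := out = crypto_alt s
instance (s : String) (out : String) : Decidable (Spec_crypto s out) := by unfold Spec_crypto; infer_instance

-- ===== CLAIM (what is proved, stated in full; the proofs are below) =====
def Claim_equal_crypto : Prop := ∀ (s : String), Dom_crypto s → Spec_crypto s (crypto s)

-- ===== LEMMAS AND PROOFS =====

-- Core invariant: running A's loop for exactly t.length steps starting with x = 1 appends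
-- the first t.length characters of the interleaving of t.reverse with t.
lemma cryptoLoop_eq (n : Nat) :
    ∀ (t y : List Char), t.length = n →
      cryptoLoop n 1 t y
        = y ++ (((t.reverse).zip t).flatMap (fun p => [p.1, p.2])).take n := by
  induction n using Nat.strong_induction_on with
  | _ n ih =>
    intro t y ht
    match n, t, ht with
    | 0, [], _ => simp [cryptoLoop]
    | 1, [a], _ => simp [cryptoLoop]
    | (k+2), (a :: r), ht =>
      have hr : r ≠ [] := by
        intro h; subst h; simp at ht
      obtain ⟨m, b, rfl⟩ : ∃ m b, r = m ++ [b] := by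
        obtain ⟨b, m, h⟩ := List.exists_cons_of_ne_nil (List.reverse_ne_nil_iff.mpr hr)
        exact ⟨m.reverse, b, by
          have := congrArg List.reverse h; simpa using this⟩
      have hm : m.length = k := by simpa using ht
      -- two steps of the loop
      have step1 : (a :: (m ++ [b])).drop ((a :: (m ++ [b])).length - 1) = [b] := by
        simp
      have stepd : (a :: (m ++ [b])).dropLast = a :: m := by
        rw [show a :: (m ++ [b]) = (a :: m) ++ [b] from rfl, List.dropLast_concat]
      have h2 : cryptoLoop (k + 2) 1 (a :: (m ++ [b])) y
          = cryptoLoop k 1 m ((y ++ [b]) ++ [a]) := by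
        rw [show (k+2) = (k+1)+1 from rfl]
        rw [cryptoLoop]
        simp only [step1, stepd]
        rw [cryptoLoop]
        norm_num
      rw [h2, ih k (by omega) m ((y ++ [b]) ++ [a]) hm]
      -- now compute the RHS interleaving
      have hz : ((a :: (m ++ [b])).reverse).zip (a :: (m ++ [b]))
          = (b, a) :: (((m.reverse).zip m) ++ [(a, b)]) := by
        have : (m.reverse ++ [a]).zip (m ++ [b]) = (m.reverse).zip m ++ [(a, b)] := by
          rw [List.zip_append (by simp)]
          simp
        simp [this]
      rw [hz]
      have hlen : (((m.reverse).zip m).flatMap (fun p => [p.1, p.2])).length = 2 * k := by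
        rw [List.length_flatMap]
        simp [hm, Nat.mul_comm]
      simp [List.flatMap_cons, List.flatMap_append,
            List.take_append_of_le_length (by rw [hlen]; omega : k ≤ _)]

-- ===== VERDICT (by name: the statement is the Claim_ definition above) =====
theorem crypto_spec : Claim_equal_crypto := by
  intro s _
  unfold Spec_crypto crypto crypto_alt
  rw [cryptoLoop_eq s.toList.length s.toList [' '] rfl]
  simp
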